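-- pv_equiv track=rewrite | github.com/mortenlj/advent_of_code | ibidem/advent_of_code/y2024/dec19.py | find_designs
-- ===== SOURCE A (Python) =====
-- def find_designs(
--     cache: dict[str, list[list[str]]], towels: list[str], design: str
-- ) -> list[list[str]]:
--     if design in cache:
--         return cache[design]
--     results = []
--     for towel in towels:
--         if design.startswith(towel):
--             remaining = design[len(towel) :]
--             if not remaining:
--                 results.append([towel])
--                 continue
--             possible_patterns = find_designs(cache, towels, remaining)
--             results.extend([towel] + pattern for pattern in possible_patterns)
--     cache[design] = results
--     return results
-- ===== SOURCE B (Python) =====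
-- def find_designs(
--     cache: dict[str, list[list[str]]], towels: list[str], design: str
-- ) -> list[list[str]]:
--     # Bottom-up over suffix positions instead of memoized recursion.
--     # NOTE: like A, this mutates `cache`; B may cache additional (unreachable)
--     # suffixes that A's recursion never visits — the equivalence claimed is
--     # about the RETURN value.
--     if design in cache:
--         return cache[design]
--     n = len(design)
--     table = {}
--     for p in range(n, -1, -1):
--         suffix = design[p:]
--         if suffix in cache:
--             table[p] = cache[suffix]
--             continue
--         results = []
--         for towel in towels:
--             if suffix.startswith(towel):
--                 j = p + len(towel)
--                 if j == n:
--                     results.append([towel])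
--                 else:
--                     results.extend([towel] + pat for pat in table[j])
--         table[p] = results
--     for p in range(n - 1, 0, -1):
--         suffix = design[p:]
--         if suffix not in cache:
--             cache[suffix] = table[p]
--     cache[design] = table[0]
--     return table[0]
-- ===== Notes on version B (the rewrite author's own statement) =====
-- stated objective: alternative
-- what changed: Replaces A's cache-threaded top-down recursion over suffix strings with a bottom-up dynamic-programming pass that fills a position-indexed table from the longest suffix to the whole design (still consulting the incoming cache per suffix); same memoized cost, no recursion.
import Mathlib
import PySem

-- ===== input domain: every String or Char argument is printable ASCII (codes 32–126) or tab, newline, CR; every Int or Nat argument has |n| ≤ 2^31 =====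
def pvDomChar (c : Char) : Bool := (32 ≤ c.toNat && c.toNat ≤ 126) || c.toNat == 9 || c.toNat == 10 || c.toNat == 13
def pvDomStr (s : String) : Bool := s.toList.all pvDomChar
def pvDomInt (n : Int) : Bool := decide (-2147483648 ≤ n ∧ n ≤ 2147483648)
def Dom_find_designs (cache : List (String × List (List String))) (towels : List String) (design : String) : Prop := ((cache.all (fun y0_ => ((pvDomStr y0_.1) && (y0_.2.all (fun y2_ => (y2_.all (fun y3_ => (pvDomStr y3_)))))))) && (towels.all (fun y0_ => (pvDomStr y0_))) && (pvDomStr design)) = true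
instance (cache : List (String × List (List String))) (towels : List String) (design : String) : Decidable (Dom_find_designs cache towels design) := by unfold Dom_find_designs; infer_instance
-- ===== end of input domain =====

-- B rebuilds A's memoized recursion as a bottom-up pass over suffix positions (alternative
-- decomposition, same cost). Both Pythons mutate `cache` (B may cache extra suffixes A's
-- recursion never visits); the equivalence proved here is about the RETURN value only.

-- ===== PORT A =====
-- A's recursion, fuel = remaining design length + 1 (sufficient whenever "" ∉ towels;
-- under Pre_ the fuel-exhausted branch is never reached). The mutated dict is threaded.
def find_designs_rec (towels : List String) :
    Nat → PySem.Dict String (List (List String)) → String →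
    (List (List String) × PySem.Dict String (List (List String)))
  | 0, st, _ => ([], st)
  | fuel+1, st, design =>
    match st.get? design with
    | some v => (v, st)
    | none =>
      let r := towels.foldl
        (fun acc towel =>
          if PySem.Str.startswith design towel then
            let remaining := PySem.Str.slice design (some (PySem.Str.len towel)) none
            if remaining = "" then (acc.1 ++ [[towel]], acc.2)
            else
              let pr := find_designs_rec towels fuel acc.2 remaining
              (acc.1 ++ pr.1.map (fun pattern => towel :: pattern), pr.2)
          else acc)
        (([] : List (List String)), st)
      (r.1, r.2.insert design r.1)

def find_designs (cache : List (String × List (List String))) (towels : List String) (design : String) : List (List String) :=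
  (find_designs_rec towels (design.toList.length + 1) (PySem.Dict.mk cache) design).1

-- ===== PORT B =====
-- Source B: bottom-up table over suffix positions n..0.  The final loop of Source B that writes
-- the table back into `cache` only mutates the argument and cannot affect the return
-- value, so it has no counterpart under this signature.
def find_designs_alt (cache : List (String × List (List String))) (towels : List String) (design : String) : List (List String) :=
  let d := PySem.Dict.mk cache
  match d.get? design with
  | some v => v
  | none =>
    let n : Int := PySem.Str.len design
    let table := (PySem.List.pyRange n (-1) (-1)).foldl
      (fun (table : PySem.Dict Int (List (List String))) p =>
        let suffix := PySem.Str.slice design (some p) none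
        match d.get? suffix with
        | some v => table.insert p v
        | none =>
          let results := towels.foldl
            (fun res towel =>
              if PySem.Str.startswith suffix towel then
                let j := p + PySem.Str.len towel
                if j = n then res ++ [[towel]]
                else res ++ (table.getD j []).map (fun pat => towel :: pat)
              else res) []
          table.insert p results)
      PySem.Dict.empty
    table.getD 0 []

-- ===== PRECONDITION & SPEC =====
-- Pre_ excludes exactly the inputs on which A raises (RecursionError): an empty towel
-- together with a nonempty design that is not already a key of the cache.
def Pre_find_designs (cache : List (String × List (List String))) (towels : List String) (design : String) : Prop :=
  "" ∈ towels → design = "" ∨ design ∈ cache.map Prod.fst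
instance (cache : List (String × List (List String))) (towels : List String) (design : String) : Decidable (Pre_find_designs cache towels design) := by unfold Pre_find_designs; infer_instance

def pvWitness_find_designs : (List (String × List (List String))) × List String × String :=
  ([("gr", [["g", "r"]])], ["r", "g", "rg"], "rgr")

def Spec_find_designs (cache : List (String × List (List String))) (towels : List String) (design : String) (out : List (List String)) : Prop := out = find_designs_alt cache towels design
instance (cache : List (String × List (List String))) (towels : List String) (design : String) (out : List (List String)) : Decidable (Spec_find_designs cache towels design out) := by unfold Spec_find_designs; infer_instance

-- ===== CLAIM (what is proved, stated in full; the proofs are below) =====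
def Claim_equal_find_designs : Prop := ∀ (cache : List (String × List (List String))) (towels : List String) (design : String), Dom_find_designs cache towels design → Pre_find_designs cache towels design → Spec_find_designs cache towels design (find_designs cache towels design)


-- ===== LEMMAS AND PROOFS =====

-- The common pure value both programs compute: decompositions of a suffix, looked up in
-- the INITIAL cache first (fuel-indexed so it is structural; fuel is irrelevant once large enough).
def pvMemoF (d0 : PySem.Dict String (List (List String))) (towels : List String) :
    Nat → String → List (List String)
  | 0, _ => []
  | fuel+1, s =>
    match d0.get? s with
    | some v => v
    | none =>
      towels.foldl
        (fun res towel =>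
          if PySem.Str.startswith s towel then
            if PySem.Str.slice s (some (PySem.Str.len towel)) none = "" then res ++ [[towel]]
            else res ++ (pvMemoF d0 towels fuel (PySem.Str.slice s (some (PySem.Str.len towel)) none)).map
              (fun pattern => towel :: pattern)
          else res) []

def pvMemo (d0 : PySem.Dict String (List (List String))) (towels : List String) (s : String) :
    List (List String) := pvMemoF d0 towels (s.toList.length + 1) s

lemma pvSW {s t : String} (h : PySem.Str.startswith s t = true) : t.toList <+: s.toList := by
  rw [PySem.Str.startswith_eq] at h
  exact (PySem.Chars.startswith_iff _ _).mp h

lemma pvLen_pos {t : String} (h : t ≠ "") : 1 ≤ t.toList.length := by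
  rcases Nat.eq_zero_or_pos t.toList.length with h0 | h1
  · exact absurd (String.toList_inj.mp (List.length_eq_zero_iff.mp h0)) h
  · exact h1

lemma pvRem_toList (s t : String) :
    (PySem.Str.slice s (some (PySem.Str.len t)) none).toList = s.toList.drop t.toList.length := by
  rw [PySem.Str.toList_slice, PySem.Chars.slice_eq_listSlice, PySem.Str.len_eq,
    PySem.List.slice_from_natCast]

lemma pvRem_lt {towels : List String} (hne : "" ∉ towels) {s t : String} (ht : t ∈ towels)
    (hsw : PySem.Str.startswith s t = true) :
    (PySem.Str.slice s (some (PySem.Str.len t)) none).toList.length < s.toList.length := by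
  rw [pvRem_toList, List.length_drop]
  have h1 : 1 ≤ t.toList.length := pvLen_pos (fun h => hne (h ▸ ht))
  have h2 := (pvSW hsw).length_le
  omega

lemma pvSuffix_toList (design : String) {j : Int} (hj : 0 ≤ j) :
    (PySem.Str.slice design (some j) none).toList = design.toList.drop j.toNat := by
  rw [PySem.Str.toList_slice, PySem.Chars.slice_eq_listSlice, PySem.List.slice_from _ hj]

lemma pvSuffix_suffix (design t : String) {j : Int} (hj : 0 ≤ j) :
    PySem.Str.slice (PySem.Str.slice design (some j) none) (some (PySem.Str.len t)) none
      = PySem.Str.slice design (some (j + PySem.Str.len t)) none := by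
  apply String.toList_inj.mp
  rw [pvRem_toList, pvSuffix_toList design hj, pvSuffix_toList design
    (by rw [PySem.Str.len_eq]; positivity), List.drop_drop]
  congr 1
  rw [PySem.Str.len_eq]
  omega

lemma pvMemo_of_get {d0 : PySem.Dict String (List (List String))} {towels : List String}
    {s : String} {v : List (List String)} (h : d0.get? s = some v) :
    pvMemo d0 towels s = v := by
  unfold pvMemo pvMemoF
  rw [h]

lemma pvMemoF_irrel {d0 : PySem.Dict String (List (List String))} {towels : List String}
    (hne : "" ∉ towels) :
    ∀ (f1 f2 : Nat) (s : String), s.toList.length < f1 → s.toList.length < f2 →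
      pvMemoF d0 towels f1 s = pvMemoF d0 towels f2 s := by
  intro f1
  induction f1 with
  | zero => intro f2 s h1 h2; omega
  | succ f1 ih =>
    intro f2 s h1 h2
    cases f2 with
    | zero => omega
    | succ f2 =>
      rw [pvMemoF, pvMemoF]
      cases hd : d0.get? s with
      | some v => rfl
      | none =>
        apply PySem.List.foldl_congr_mem
        intro res t ht
        by_cases hsw : PySem.Str.startswith s t = true
        · rw [if_pos hsw, if_pos hsw]
          by_cases hrem : PySem.Str.slice s (some (PySem.Str.len t)) none = ""
          · rw [if_pos hrem, if_pos hrem]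
          · have hlt := pvRem_lt hne ht hsw
            rw [if_neg hrem, if_neg hrem, ih f2 _ (by omega) (by omega)]
        · rw [if_neg hsw, if_neg hsw]

lemma pvMemo_unfold {d0 : PySem.Dict String (List (List String))} {towels : List String}
    (hne : "" ∉ towels) (s : String) (h : d0.get? s = none) :
    pvMemo d0 towels s = towels.foldl
      (fun res towel =>
        if PySem.Str.startswith s towel then
          if PySem.Str.slice s (some (PySem.Str.len towel)) none = "" then res ++ [[towel]]
          else res ++ (pvMemo d0 towels (PySem.Str.slice s (some (PySem.Str.len towel)) none)).map
            (fun pattern => towel :: pattern)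
        else res) [] := by
  unfold pvMemo
  rw [pvMemoF, h]
  apply PySem.List.foldl_congr_mem
  intro res t ht
  by_cases hsw : PySem.Str.startswith s t = true
  · rw [if_pos hsw, if_pos hsw]
    by_cases hrem : PySem.Str.slice s (some (PySem.Str.len t)) none = ""
    · rw [if_pos hrem, if_pos hrem]
    · have hlt := pvRem_lt hne ht hsw
      rw [if_neg hrem, if_neg hrem,
        pvMemoF_irrel hne s.toList.length
          ((PySem.Str.slice s (some (PySem.Str.len t)) none).toList.length + 1)
          (PySem.Str.slice s (some (PySem.Str.len t)) none) hlt (by omega)]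
  · rw [if_neg hsw, if_neg hsw]

-- invariant carried through A's threaded cache: it extends the initial cache and every
-- entry is the memo value of its key
def pvInv (d0 st : PySem.Dict String (List (List String))) (towels : List String) : Prop :=
  (∀ k v, d0.get? k = some v → st.get? k = some v) ∧
  (∀ k v, st.get? k = some v → v = pvMemo d0 towels k)

lemma pvGoA {d0 : PySem.Dict String (List (List String))} {towels : List String}
    (hne : "" ∉ towels) (fuel : Nat) (design : String)
    (hlen : design.toList.length ≤ fuel)
    (ihA : ∀ (design : String) (st : PySem.Dict String (List (List String))),
      design.toList.length < fuel → pvInv d0 st towels →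
      (find_designs_rec towels fuel st design).1 = pvMemo d0 towels design ∧
      pvInv d0 (find_designs_rec towels fuel st design).2 towels) :
    ∀ (rest : List String), (∀ t ∈ rest, t ∈ towels) →
    ∀ (res : List (List String)) (st : PySem.Dict String (List (List String))),
      pvInv d0 st towels →
      (rest.foldl (fun acc towel =>
          if PySem.Str.startswith design towel then
            if PySem.Str.slice design (some (PySem.Str.len towel)) none = "" then
              (acc.1 ++ [[towel]], acc.2)
            else
              (acc.1 ++ (find_designs_rec towels fuel acc.2
                  (PySem.Str.slice design (some (PySem.Str.len towel)) none)).1.map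
                  (fun pattern => towel :: pattern),
                (find_designs_rec towels fuel acc.2
                  (PySem.Str.slice design (some (PySem.Str.len towel)) none)).2)
          else acc) (res, st)).1
        = rest.foldl (fun res towel =>
            if PySem.Str.startswith design towel then
              if PySem.Str.slice design (some (PySem.Str.len towel)) none = "" then res ++ [[towel]]
              else res ++ (pvMemo d0 towels
                  (PySem.Str.slice design (some (PySem.Str.len towel)) none)).map
                  (fun pattern => towel :: pattern)
            else res) res
      ∧ pvInv d0 (rest.foldl (fun acc towel =>
          if PySem.Str.startswith design towel then
            if PySem.Str.slice design (some (PySem.Str.len towel)) none = "" then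
              (acc.1 ++ [[towel]], acc.2)
            else
              (acc.1 ++ (find_designs_rec towels fuel acc.2
                  (PySem.Str.slice design (some (PySem.Str.len towel)) none)).1.map
                  (fun pattern => towel :: pattern),
                (find_designs_rec towels fuel acc.2
                  (PySem.Str.slice design (some (PySem.Str.len towel)) none)).2)
          else acc) (res, st)).2 towels := by
  intro rest
  induction rest with
  | nil => intro _ res st hinv; exact ⟨rfl, hinv⟩
  | cons t rest ih =>
    intro hsub res st hinv
    have ht : t ∈ towels := hsub t (List.mem_cons_self ..)
    simp only [List.foldl_cons]
    by_cases hsw : PySem.Str.startswith design t = true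
    · simp only [hsw, if_true]
      by_cases hrem : PySem.Str.slice design (some (PySem.Str.len t)) none = ""
      · simp only [hrem, if_true]
        exact ih (fun x hx => hsub x (List.mem_cons_of_mem _ hx)) (res ++ [[t]]) st hinv
      · simp only [hrem, if_false]
        have hlt := pvRem_lt hne ht hsw
        obtain ⟨h1, h2⟩ := ihA (PySem.Str.slice design (some (PySem.Str.len t)) none) st
          (by omega) hinv
        rw [h1]
        exact ih (fun x hx => hsub x (List.mem_cons_of_mem _ hx)) _ _ h2
    · simp only [hsw]
      exact ih (fun x hx => hsub x (List.mem_cons_of_mem _ hx)) res st hinv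

lemma pvA_correct {d0 : PySem.Dict String (List (List String))} {towels : List String}
    (hne : "" ∉ towels) :
    ∀ (fuel : Nat) (design : String) (st : PySem.Dict String (List (List String))),
      design.toList.length < fuel → pvInv d0 st towels →
      (find_designs_rec towels fuel st design).1 = pvMemo d0 towels design ∧
      pvInv d0 (find_designs_rec towels fuel st design).2 towels := by
  intro fuel
  induction fuel with
  | zero => intro design st h _; omega
  | succ fuel ih =>
    intro design st hlen hinv
    cases hget : st.get? design with
    | some v =>
      simp only [find_designs_rec, hget]
      exact ⟨hinv.2 _ _ hget, hinv⟩
    | none =>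
      have hd0 : d0.get? design = none := by
        cases hd : d0.get? design with
        | none => rfl
        | some w => rw [hinv.1 _ _ hd] at hget; exact absurd hget (by simp)
      have hgo := pvGoA hne fuel design (by omega) ih towels (fun t ht => ht) [] st hinv
      simp only [find_designs_rec, hget]
      refine ⟨?_, ?_⟩
      · rw [hgo.1, pvMemo_unfold hne design hd0]
      · obtain ⟨hinv1, hinv2⟩ := hgo.2
        refine ⟨fun k v hk => ?_, fun k v hk => ?_⟩
        · rw [PySem.Dict.get?_insert]
          split
          · next heq => rw [heq] at hk; rw [hk] at hd0; exact absurd hd0 (by simp)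
          · exact hinv1 _ _ hk
        · rw [PySem.Dict.get?_insert] at hk
          split at hk
          · next heq =>
            cases hk
            rw [heq, hgo.1, pvMemo_unfold hne design hd0]
          · exact hinv2 _ _ hk

lemma pvB_step {d0 : PySem.Dict String (List (List String))} {towels : List String}
    (hne : "" ∉ towels) (design : String) (k : Nat)
    (hkn : (k : Int) ≤ PySem.Str.len design)
    (table : PySem.Dict Int (List (List String)))
    (htab : ∀ j : Int, (k : Int) < j → j ≤ PySem.Str.len design →
      table.getD j [] = pvMemo d0 towels (PySem.Str.slice design (some j) none))
    (hd : d0.get? (PySem.Str.slice design (some (k : Int)) none) = none) :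
    towels.foldl
      (fun res towel =>
        if PySem.Str.startswith (PySem.Str.slice design (some (k : Int)) none) towel then
          if (k : Int) + PySem.Str.len towel = PySem.Str.len design then res ++ [[towel]]
          else res ++ (table.getD ((k : Int) + PySem.Str.len towel) []).map
            (fun pat => towel :: pat)
        else res) []
      = pvMemo d0 towels (PySem.Str.slice design (some (k : Int)) none) := by
  rw [pvMemo_unfold hne _ hd]
  apply PySem.List.foldl_congr_mem
  intro res t ht
  by_cases hsw : PySem.Str.startswith (PySem.Str.slice design (some (k : Int)) none) t = true
  case neg => rw [if_neg hsw, if_neg hsw]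
  case pos =>
    rw [if_pos hsw, if_pos hsw]
    have htpos : 1 ≤ t.toList.length := pvLen_pos (fun h => hne (h ▸ ht))
    have hsuf : (PySem.Str.slice design (some (k : Int)) none).toList
        = design.toList.drop k := by
      rw [pvSuffix_toList design (by positivity), Int.toNat_natCast]
    have hple := (pvSW hsw).length_le
    rw [hsuf, List.length_drop] at hple
    have hlen_t : PySem.Str.len t = (t.toList.length : Int) := PySem.Str.len_eq t
    have hlen_d : PySem.Str.len design = (design.toList.length : Int) := PySem.Str.len_eq design
    have hrem := pvSuffix_suffix design t (show (0 : Int) ≤ (k : Int) by positivity)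
    have hrem_list : (PySem.Str.slice design (some ((k : Int) + PySem.Str.len t)) none).toList
        = design.toList.drop (k + t.toList.length) := by
      have hnat : ((k : Int) + PySem.Str.len t).toNat = k + t.toList.length := by
        rw [hlen_t]; omega
      rw [pvSuffix_toList design (by rw [hlen_t]; positivity), hnat]
    have hcond : (PySem.Str.slice (PySem.Str.slice design (some (k : Int)) none)
        (some (PySem.Str.len t)) none = "")
        ↔ (k : Int) + PySem.Str.len t = PySem.Str.len design := by
      rw [hrem]
      constructor
      · intro h
        have h2 : design.toList.drop (k + t.toList.length) = [] := by
          rw [← hrem_list, h]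
          simp
        rw [List.drop_eq_nil_iff] at h2
        rw [hlen_t, hlen_d]
        omega
      · intro h
        have h2 : design.toList.length ≤ k + t.toList.length := by
          rw [hlen_t, hlen_d] at h
          omega
        apply String.toList_inj.mp
        rw [hrem_list, List.drop_eq_nil_iff.mpr h2]
        simp
    by_cases hend : (k : Int) + PySem.Str.len t = PySem.Str.len design
    · rw [if_pos hend, if_pos (hcond.mpr hend)]
    · rw [if_neg hend, if_neg (fun h => hend (hcond.mp h)), hrem,
        htab ((k : Int) + PySem.Str.len t) (by rw [hlen_t]; omega)
          (by rw [hlen_t, hlen_d]; omega)]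

lemma pvB_fold {d0 : PySem.Dict String (List (List String))} {towels : List String}
    (design : String) (hne : "" ∉ towels) :
    ∀ (k : Nat) (table : PySem.Dict Int (List (List String))),
      (k : Int) ≤ PySem.Str.len design + 1 →
      (∀ j : Int, (k : Int) - 1 < j → j ≤ PySem.Str.len design →
        table.getD j [] = pvMemo d0 towels (PySem.Str.slice design (some j) none)) →
      ∀ j : Int, 0 ≤ j → j ≤ PySem.Str.len design →
        ((PySem.List.pyRange ((k : Int) - 1) (-1) (-1)).foldl
          (fun (table : PySem.Dict Int (List (List String))) p =>
            match d0.get? (PySem.Str.slice design (some p) none) with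
            | some v => table.insert p v
            | none =>
              table.insert p (towels.foldl
                (fun res towel =>
                  if PySem.Str.startswith (PySem.Str.slice design (some p) none) towel then
                    if p + PySem.Str.len towel = PySem.Str.len design then res ++ [[towel]]
                    else res ++ (table.getD (p + PySem.Str.len towel) []).map
                      (fun pat => towel :: pat)
                  else res) [])) table).getD j []
          = pvMemo d0 towels (PySem.Str.slice design (some j) none) := by
  intro k
  induction k with
  | zero =>
    intro table _ htab j hj0 hjn
    rw [show ((0 : Nat) : Int) - 1 = -1 by norm_num, PySem.List.pyRange_neg_one_eq_nil le_rfl]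
    exact htab j (by omega) hjn
  | succ k ih =>
    intro table hk htab j hj0 hjn
    have hcons : ((k + 1 : Nat) : Int) - 1 = (k : Int) := by push_cast; ring
    rw [hcons, PySem.List.pyRange_neg_one_cons (by omega), List.foldl_cons]
    have hkn : (k : Int) ≤ PySem.Str.len design := by push_cast at hk; omega
    have htab' : ∀ j : Int, (k : Int) < j → j ≤ PySem.Str.len design →
        table.getD j [] = pvMemo d0 towels (PySem.Str.slice design (some j) none) :=
      fun j h1 h2 => htab j (by push_cast; omega) h2
    refine ih _ (by omega) ?_ j hj0 hjn
    intro j' hj'1 hj'2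
    cases hd : d0.get? (PySem.Str.slice design (some (k : Int)) none) with
    | some v =>
      rw [PySem.Dict.getD_insert]
      split
      · next heq => rw [heq, pvMemo_of_get hd]
      · next hnoteq => exact htab' j' (by omega) hj'2
    | none =>
      rw [PySem.Dict.getD_insert]
      split
      · next heq =>
        rw [heq]
        exact pvB_step hne design k hkn table htab' hd
      · next hnoteq => exact htab' j' (by omega) hj'2

-- the degenerate design = "" case (the only one Pre_ admits when "" ∈ towels and the
-- design is not cached): both programs reduce to one pass appending [towel] per empty towel
lemma pvRem_of_empty (t : String) :
    PySem.Str.slice "" (some (PySem.Str.len t)) none = "" := by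
  apply String.toList_inj.mp
  rw [pvRem_toList]
  simp

lemma pvSuffix_zero (design : String) : PySem.Str.slice design (some (0 : Int)) none = design := by
  apply String.toList_inj.mp
  rw [pvSuffix_toList design le_rfl]
  simp

lemma pvEmpty_case (cache : List (String × List (List String))) (towels : List String)
    (hget : (PySem.Dict.mk cache).get? "" = none) :
    find_designs cache towels "" = find_designs_alt cache towels "" := by
  have hA : ∀ (acc : List (List String) × PySem.Dict String (List (List String))),
      ∀ t ∈ towels,
      (if PySem.Str.startswith "" t then
        if PySem.Str.slice "" (some (PySem.Str.len t)) none = "" then (acc.1 ++ [[t]], acc.2)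
        else (acc.1 ++ List.map (fun pattern => t :: pattern) [], acc.2)
      else acc)
      = (if PySem.Str.startswith "" t then acc.1 ++ [[t]] else acc.1, acc.2) := by
    intro acc t _
    by_cases hsw : PySem.Str.startswith "" t = true
    · rw [if_pos hsw, if_pos (pvRem_of_empty t), if_pos hsw]
    · rw [if_neg hsw, if_neg hsw]
  have hlen0 : PySem.Str.len "" = 0 := by rw [PySem.Str.len_eq]; simp
  have hrange : PySem.List.pyRange 0 (-1) (-1) = [0] := by decide
  unfold find_designs find_designs_alt
  rw [show ("" : String).toList.length + 1 = 0 + 1 from rfl]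
  simp only [find_designs_rec, hget, hlen0, hrange, List.foldl_cons, List.foldl_nil,
    pvSuffix_zero]
  rw [PySem.List.foldl_congr_mem _ _ _ _ hA,
    PySem.List.foldl_prod_mk (f := fun r t => if PySem.Str.startswith "" t then r ++ [[t]] else r)
      (g := fun (s : PySem.Dict String (List (List String))) _ => s)]
  rw [PySem.Dict.getD_insert, if_pos rfl]
  apply PySem.List.foldl_congr_mem
  intro res t ht
  by_cases hsw : PySem.Str.startswith "" t = true
  · have htl : t.toList = [] := by
      have := pvSW hsw
      simpa using this
    have hlt : PySem.Str.len t = 0 := by rw [PySem.Str.len_eq, htl]; simp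
    rw [if_pos hsw, if_pos hsw, if_pos (by rw [hlt]; ring)]
  · rw [if_neg hsw, if_neg hsw]

def pvInv_init (d0 : PySem.Dict String (List (List String))) (towels : List String) :
    pvInv d0 d0 towels :=
  ⟨fun _ _ h => h, fun _ _ h => (pvMemo_of_get h).symm⟩

lemma pvB_correct {cache : List (String × List (List String))} {towels : List String}
    {design : String} (hne : "" ∉ towels)
    (hget : (PySem.Dict.mk cache).get? design = none) :
    find_designs_alt cache towels design = pvMemo (PySem.Dict.mk cache) towels design := by
  unfold find_designs_alt
  simp only [hget]
  have hn : PySem.Str.len design = ((design.toList.length + 1 : Nat) : Int) - 1 := by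
    rw [PySem.Str.len_eq]; push_cast; ring
  have h0 := pvB_fold (d0 := PySem.Dict.mk cache) design hne (design.toList.length + 1)
      PySem.Dict.empty (by rw [PySem.Str.len_eq]; push_cast; omega)
      (fun j h1 h2 => by
        exfalso
        rw [PySem.Str.len_eq] at h2
        push_cast at h1
        omega)
      0 le_rfl (by rw [PySem.Str.len_eq]; positivity)
  rw [← hn, pvSuffix_zero] at h0
  exact h0

-- ===== VERDICT (by name: the statement is the Claim_ definition above) =====
theorem find_designs_spec : Claim_equal_find_designs := by
  unfold Claim_equal_find_designs Spec_find_designs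
  intro cache towels design hdom hpre
  cases hget : (PySem.Dict.mk cache).get? design with
  | some v =>
    unfold find_designs find_designs_alt
    simp only [find_designs_rec, hget]
  | none =>
    by_cases hmem : "" ∈ towels
    · have hdes : design = "" := by
        rcases hpre hmem with h | h
        · exact h
        · exfalso
          rw [PySem.Dict.get?_eq_none_iff_not_mem_keys, PySem.Dict.keys_mk] at hget
          exact hget (by simpa using h)
      subst hdes
      exact pvEmpty_case cache towels hget
    · have hA := pvA_correct hmem (design.toList.length + 1) design (PySem.Dict.mk cache)
        (by omega) (pvInv_init _ _)
      unfold find_designs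
      rw [hA.1, ← pvB_correct hmem hget]
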